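-- pv_equiv track=rewrite | github.com/tc4dy/MinerCadUltimate | minercad.py | detect_waf
-- ===== SOURCE A (Python) =====
-- def detect_waf(headers, content):
--     waf_signatures = {
--         'Cloudflare': ['cloudflare', 'cf-ray', '__cfduid'],
--         'Akamai': ['akamai', 'akamaighost'],
--         'AWS WAF': ['awselb', 'x-amz-'],
--         'Sucuri': ['sucuri', 'x-sucuri'],
--         'Incapsula': ['incap_ses', 'visid_incap'],
--         'ModSecurity': ['mod_security', 'NOYB'],
--         'Barracuda': ['barracuda'],
--         'F5 BIG-IP': ['BigIP', 'F5'],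
--         'Fortinet': ['fortigate', 'fortiweb'],
--     }
--
--     detected = set()
--     for waf, signatures in waf_signatures.items():
--         for sig in signatures:
--             if any(sig.lower() in str(v).lower() for v in headers.values()):
--                 detected.add(waf)
--             if sig.lower() in content.lower():
--                 detected.add(waf)
--
--     return detected
-- ===== SOURCE B (Python) =====
-- def detect_waf(headers, content):
--     waf_signatures = {
--         'Cloudflare': ['cloudflare', 'cf-ray', '__cfduid'],
--         'Akamai': ['akamai', 'akamaighost'],
--         'AWS WAF': ['awselb', 'x-amz-'],
--         'Sucuri': ['sucuri', 'x-sucuri'],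
--         'Incapsula': ['incap_ses', 'visid_incap'],
--         'ModSecurity': ['mod_security', 'NOYB'],
--         'Barracuda': ['barracuda'],
--         'F5 BIG-IP': ['BigIP', 'F5'],
--         'Fortinet': ['fortigate', 'fortiweb'],
--     }
--     # One lowercased corpus: space-joined header values plus the content.
--     # Safe because no signature contains whitespace.
--     corpus = ' '.join(str(v).lower() for v in headers.values()) + ' ' + content.lower()
--     return {waf for waf, sigs in waf_signatures.items()
--             if any(sig.lower() in corpus for sig in sigs)}
-- ===== Notes on version B (the rewrite author's own statement) =====
-- stated objective: simpler
-- what changed: B builds one lowercased space-joined corpus (header values + content) up front and returns a set comprehension over the signature table, replacing A's per-signature inner scan over header values and its separate content branch with a single substring test per signature.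
import Mathlib
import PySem

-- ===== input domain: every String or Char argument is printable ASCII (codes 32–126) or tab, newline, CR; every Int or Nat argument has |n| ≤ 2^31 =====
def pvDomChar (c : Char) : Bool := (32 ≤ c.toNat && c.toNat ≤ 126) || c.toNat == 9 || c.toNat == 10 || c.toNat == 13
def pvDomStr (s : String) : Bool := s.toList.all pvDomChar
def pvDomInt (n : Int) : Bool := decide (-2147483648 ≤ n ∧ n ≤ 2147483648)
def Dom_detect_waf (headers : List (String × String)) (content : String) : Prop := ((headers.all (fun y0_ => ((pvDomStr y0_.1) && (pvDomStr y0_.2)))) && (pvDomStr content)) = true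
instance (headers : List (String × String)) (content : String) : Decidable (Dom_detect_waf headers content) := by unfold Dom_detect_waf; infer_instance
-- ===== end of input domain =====

-- B replaces A's per-signature header scan and separate content branch by one membership test
-- against a single pre-built lowercased corpus (space-joined header values + content); objective: simpler.

-- the waf_signatures dict literal shared by both Pythons (iterated in insertion order)
def pvWafSigs : List (String × List String) :=
  [("Cloudflare", ["cloudflare", "cf-ray", "__cfduid"]),
   ("Akamai", ["akamai", "akamaighost"]),
   ("AWS WAF", ["awselb", "x-amz-"]),
   ("Sucuri", ["sucuri", "x-sucuri"]),
   ("Incapsula", ["incap_ses", "visid_incap"]),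
   ("ModSecurity", ["mod_security", "NOYB"]),
   ("Barracuda", ["barracuda"]),
   ("F5 BIG-IP", ["BigIP", "F5"]),
   ("Fortinet", ["fortigate", "fortiweb"])]

-- ===== PORT A =====
-- string ops are ported on the List Char side (PySem.Str.* are thin wrappers over PySem.Chars.*)
def detect_waf (headers : List (String × String)) (content : String) : List String :=
  pvWafSigs.foldl (fun detected wp =>
    wp.2.foldl (fun det sig =>
      let det := if (headers.map Prod.snd).any (fun v =>
          PySem.Chars.isIn (PySem.Chars.lower sig.toList) (PySem.Chars.lower v.toList))
        then PySem.Set.add det wp.1 else det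
      if PySem.Chars.isIn (PySem.Chars.lower sig.toList) (PySem.Chars.lower content.toList)
        then PySem.Set.add det wp.1 else det) detected) []

-- ===== PORT B =====
def detect_waf_alt (headers : List (String × String)) (content : String) : List String :=
  let corpus : List Char :=
    PySem.Chars.join [' '] (headers.map (fun h => PySem.Chars.lower h.2.toList))
      ++ ' ' :: PySem.Chars.lower content.toList
  PySem.Set.ofList ((pvWafSigs.filter (fun wp =>
    wp.2.any (fun sig => PySem.Chars.isIn (PySem.Chars.lower sig.toList) corpus))).map Prod.fst)

-- ===== PRECONDITION & SPEC =====
def Spec_detect_waf (headers : List (String × String)) (content : String) (out : List String) : Prop := out = detect_waf_alt headers content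
instance (headers : List (String × String)) (content : String) (out : List String) : Decidable (Spec_detect_waf headers content out) := by unfold Spec_detect_waf; infer_instance

-- ===== CLAIM (what is proved, stated in full; the proofs are below) =====
def Claim_equal_detect_waf : Prop := ∀ (headers : List (String × String)) (content : String), Dom_detect_waf headers content → Spec_detect_waf headers content (detect_waf headers content)

-- ===== LEMMAS AND PROOFS =====

-- a prefix of x ++ c :: y that avoids c is a prefix of x
theorem pv_prefix_split {sig x y : List Char} {c : Char} (hc : c ∉ sig)
    (h : sig <+: x ++ c :: y) : sig <+: x := by
  induction sig generalizing x with
  | nil => exact List.nil_prefix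
  | cons s sig ih =>
    cases x with
    | nil =>
      obtain ⟨t, ht⟩ := h
      simp only [List.cons_append, List.nil_append, List.cons.injEq] at ht
      exact absurd (ht.1 ▸ List.mem_cons_self) hc
    | cons a x =>
      rw [List.cons_append, List.cons_prefix_cons] at h
      exact List.cons_prefix_cons.mpr ⟨h.1, ih (fun hm => hc (List.mem_cons_of_mem _ hm)) h.2⟩

-- an infix of x ++ c :: y that avoids c lies entirely in x or entirely in y
theorem pv_infix_split {sig x y : List Char} {c : Char} (hc : c ∉ sig) :
    sig <:+: x ++ c :: y ↔ sig <:+: x ∨ sig <:+: y := by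
  constructor
  · intro h
    induction x with
    | nil =>
      simp only [List.nil_append, List.infix_cons_iff] at h
      rcases h with h | h
      · left
        have : sig = [] := List.prefix_nil.mp (pv_prefix_split (x := []) hc h)
        simp [this]
      · right; exact h
    | cons a x ih =>
      rw [List.cons_append, List.infix_cons_iff] at h
      rcases h with h | h
      · exact Or.inl (pv_prefix_split hc (by simpa using h)).isInfix
      · rcases ih h with h | h
        · exact Or.inl (h.trans (List.suffix_cons a x).isInfix)
        · exact Or.inr h
  · rintro (h | h)
    · exact h.trans (List.prefix_append x (c :: y)).isInfix
    · exact h.trans ((List.suffix_cons c y).trans (List.suffix_append_of_suffix (List.suffix_refl _))).isInfix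

-- a space-free needle is in the corpus iff it is in one of the joined parts or in the tail
theorem pv_corpus_split {sig : List Char} (parts : List (List Char)) (last : List Char)
    (hc : ' ' ∉ sig) :
    sig <:+: (PySem.Chars.join [' '] parts ++ ' ' :: last) ↔
      (∃ p ∈ parts, sig <:+: p) ∨ sig <:+: last := by
  induction parts with
  | nil =>
    have h0 := pv_infix_split (x := []) (y := last) hc
    simp only [List.nil_append] at h0
    rw [PySem.Chars.join_nil, List.nil_append, h0]
    constructor
    · rintro (h | h)
      · rw [List.infix_nil.mp h]
        exact Or.inr List.nil_infix
      · exact Or.inr h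
    · rintro (⟨p, hp, _⟩ | h)
      · cases hp
      · exact Or.inr h
  | cons p ps ih =>
    cases ps with
    | nil => simp [PySem.Chars.join_singleton, pv_infix_split hc]
    | cons q qs =>
      rw [PySem.Chars.join_cons_cons, List.append_assoc, List.append_assoc, List.singleton_append,
        pv_infix_split hc, ih]
      simp only [List.mem_cons, exists_eq_or_imp]
      exact or_assoc.symm

theorem pv_add_idem (s : List String) (x : String) :
    PySem.Set.add (PySem.Set.add s x) x = PySem.Set.add s x := by
  simp only [PySem.Set.add]
  split <;> simp_all

theorem pv_add_not_mem (s : List String) (x : String) (h : x ∉ s) :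
    PySem.Set.add s x = s ++ [x] := by
  simp [PySem.Set.add, h]

-- A's inner loop over one WAF's signatures either marks that WAF or leaves the set alone
theorem pv_inner (pH pC : String → Bool) (waf : String) (sigs : List String)
    (det : List String) :
    sigs.foldl (fun det sig =>
        let d := if pH sig then PySem.Set.add det waf else det
        if pC sig then PySem.Set.add d waf else d) det
      = if sigs.any (fun sig => pH sig || pC sig) then PySem.Set.add det waf else det := by
  induction sigs generalizing det with
  | nil => simp
  | cons s sigs ih =>
    cases hH : pH s <;> cases hC : pC s <;>
      simp only [List.foldl_cons, List.any_cons, hH, hC, Bool.false_or, Bool.true_or,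
        Bool.or_true, Bool.or_false, if_true, if_false, Bool.false_eq_true] <;>
      rw [ih] <;> split <;> simp only [pv_add_idem]

-- a fold of conditional Set.adds over pairs with fresh keys is a filter of the keys
theorem pv_outer (p : String × List String → Bool) (l : List (String × List String))
    (acc : List String) (hnd : (acc ++ l.map Prod.fst).Nodup) :
    l.foldl (fun det wp => if p wp then PySem.Set.add det wp.1 else det) acc
      = acc ++ (l.filter p).map Prod.fst := by
  induction l generalizing acc with
  | nil => simp
  | cons wp l ih =>
    rw [List.map_cons] at hnd
    have hdisj := List.disjoint_of_nodup_append hnd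
    have hnd' : (acc ++ l.map Prod.fst).Nodup :=
      hnd.sublist (List.Sublist.append (List.Sublist.refl acc) (List.sublist_cons_self _ _))
    simp only [List.foldl_cons, List.filter_cons]
    cases hp : p wp
    · simpa [hp] using ih acc hnd'
    · have hmem : wp.1 ∉ acc := fun h => hdisj h List.mem_cons_self
      simp only [ite_true]
      rw [pv_add_not_mem _ _ hmem,
        ih (acc ++ [wp.1]) (by rw [List.append_assoc]; simpa using hnd)]
      simp

-- the per-WAF predicates of the two programs agree for space-free signatures
theorem pv_pred (headers : List (String × String)) (content : String) (sig : List Char)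
    (hc : ' ' ∉ sig) :
    ((headers.map Prod.snd).any (fun v => PySem.Chars.isIn sig (PySem.Chars.lower v.toList)) ||
        PySem.Chars.isIn sig (PySem.Chars.lower content.toList))
      = PySem.Chars.isIn sig
          (PySem.Chars.join [' '] (headers.map (fun h => PySem.Chars.lower h.2.toList))
            ++ ' ' :: PySem.Chars.lower content.toList) := by
  rw [Bool.eq_iff_iff]
  simp only [Bool.or_eq_true, List.any_map, List.any_eq_true, Function.comp,
    PySem.Chars.isIn_iff_infix, pv_corpus_split _ _ hc, List.mem_map]
  constructor
  · rintro (⟨h, hh, hs⟩ | h)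
    · exact Or.inl ⟨_, ⟨h, hh, rfl⟩, hs⟩
    · exact Or.inr h
  · rintro (⟨p, ⟨h, hh, rfl⟩, hs⟩ | h)
    · exact Or.inl ⟨h, hh, hs⟩
    · exact Or.inr h

-- no lowered signature in the table contains a space
theorem pv_sigs_spacefree :
    ∀ wp ∈ pvWafSigs, ∀ sig ∈ wp.2, ' ' ∉ PySem.Chars.lower sig.toList := by decide

-- ===== VERDICT (by name: the statement is the Claim_ definition above) =====
theorem detect_waf_spec : Claim_equal_detect_waf := by
  intro headers content _
  unfold Spec_detect_waf detect_waf detect_waf_alt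
  have hfold :
      pvWafSigs.foldl (fun detected wp =>
        wp.2.foldl (fun det sig =>
          let d := if (headers.map Prod.snd).any (fun v =>
              PySem.Chars.isIn (PySem.Chars.lower sig.toList) (PySem.Chars.lower v.toList))
            then PySem.Set.add det wp.1 else det
          if PySem.Chars.isIn (PySem.Chars.lower sig.toList) (PySem.Chars.lower content.toList)
            then PySem.Set.add d wp.1 else d) detected) ([] : List String)
      = pvWafSigs.foldl (fun det wp =>
          if wp.2.any (fun sig =>
              (headers.map Prod.snd).any (fun v =>
                PySem.Chars.isIn (PySem.Chars.lower sig.toList) (PySem.Chars.lower v.toList)) ||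
              PySem.Chars.isIn (PySem.Chars.lower sig.toList) (PySem.Chars.lower content.toList))
            then PySem.Set.add det wp.1 else det) [] :=
    PySem.List.foldl_congr_mem _ _ _ _ fun det wp _ => pv_inner _ _ _ _ det
  rw [hfold, pv_outer _ _ [] (by decide)]
  rw [PySem.Set.ofList_eq_self_of_nodup _
    (((by decide : (pvWafSigs.map Prod.fst).Nodup)).sublist
      (List.filter_sublist.map Prod.fst))]
  rw [List.nil_append]
  congr 1
  refine List.filter_congr fun wp hwp => ?_
  refine PySem.List.any_congr_mem fun sig hsig => ?_
  exact pv_pred headers content _ (pv_sigs_spacefree wp hwp sig hsig)
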